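-- pv_equiv track=rewrite | github.com/Edsel-Tan/dashboard | Solutions/714.py | f
-- ===== SOURCE A (Python) =====
-- def f(a,b,c):
--     if c == 1:
--         yield a
--         return
--     for i in f(a,b,c-1):
--         yield i * 10 + a
--         yield i * 10 + b
--     return
-- ===== SOURCE B (Python) =====
-- def f(a, b, c):
--     # Iterative enumeration: k-th output's c-1 trailing digit choices are the
--     # bits of k from MSB to LSB, folded onto a leading digit a.
--     n = c - 1
--     for k in range(2 ** n):
--         val = a
--         for j in range(n):
--             bit = (k >> (n - 1 - j)) & 1
--             val = val * 10 + (b if bit else a)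
--         yield val
-- ===== Notes on version B (the rewrite author's own statement) =====
-- stated objective: alternative
-- what changed: Replaces A's recursive generator (c levels of nested generators, each pass appending digit a then b) with a flat iterative enumeration: for each k in range(2**(c-1)) the c-1 bits of k, MSB to LSB, are folded onto a leading digit a, reproducing A's exact emission order without recursion.
import Mathlib
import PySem

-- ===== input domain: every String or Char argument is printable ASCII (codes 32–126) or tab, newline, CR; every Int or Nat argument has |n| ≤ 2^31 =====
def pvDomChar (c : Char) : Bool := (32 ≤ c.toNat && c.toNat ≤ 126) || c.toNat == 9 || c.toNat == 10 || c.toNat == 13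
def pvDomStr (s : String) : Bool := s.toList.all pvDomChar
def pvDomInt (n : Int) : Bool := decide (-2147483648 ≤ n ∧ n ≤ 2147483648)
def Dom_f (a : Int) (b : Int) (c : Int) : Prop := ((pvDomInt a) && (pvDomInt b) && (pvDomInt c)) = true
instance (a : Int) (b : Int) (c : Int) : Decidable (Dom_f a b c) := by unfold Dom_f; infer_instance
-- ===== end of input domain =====

-- B replaces A's recursive generator by a flat iterative loop over the bits of a counter
-- (same emission order); objective: simpler/alternative decomposition, no speed claim.
-- Both Pythons are generators; equivalence is about the sequence of yielded values.

-- ===== PORT A =====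
-- A recurses on c; for c ≥ 1 the recursion depth is c-1, so the port recurses on the
-- fuel (c-1).toNat (for c ≤ 0 Python diverges; Pre_f excludes those inputs).
def fGo (a : Int) (b : Int) : Nat → List Int
  | 0 => [a]
  | n + 1 => (fGo a b n).flatMap (fun i => [i * 10 + a, i * 10 + b])

def f (a : Int) (b : Int) (c : Int) : List Int := fGo a b (c - 1).toNat

-- ===== PORT B =====
-- inner loop of Source B: fold the n bits of k (MSB → LSB) onto a leading a
def altVal (a : Int) (b : Int) (n : Nat) (k : Nat) : Int :=
  (List.range n).foldl (fun val j => val * 10 + (if (k >>> (n - 1 - j)) % 2 == 1 then b else a)) a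

def f_alt (a : Int) (b : Int) (c : Int) : List Int :=
  (List.range (2 ^ (c - 1).toNat)).map (altVal a b (c - 1).toNat)

-- ===== PRECONDITION & SPEC =====
-- Pre_f excludes c ≤ 0, where A's generator recurses forever (RecursionError) and B raises too.
def Pre_f (a : Int) (b : Int) (c : Int) : Prop := 1 ≤ c
instance (a : Int) (b : Int) (c : Int) : Decidable (Pre_f a b c) := by unfold Pre_f; infer_instance
def pvWitness_f : Int × Int × Int := (1, 2, 3)

def Spec_f (a : Int) (b : Int) (c : Int) (out : List Int) : Prop := out = f_alt a b c
instance (a : Int) (b : Int) (c : Int) (out : List Int) : Decidable (Spec_f a b c out) := by unfold Spec_f; infer_instance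

-- ===== CLAIM (what is proved, stated in full; the proofs are below) =====
def Claim_equal_f : Prop := ∀ (a : Int) (b : Int) (c : Int), Dom_f a b c → Pre_f a b c → Spec_f a b c (f a b c)

-- ===== LEMMAS AND PROOFS =====

-- peeling the LAST bit: the value at k over n+1 bits is the value at k/2 over n bits, times 10, plus the last digit
theorem altVal_succ (a b : Int) (n k : Nat) :
    altVal a b (n + 1) k = altVal a b n (k / 2) * 10 + (if k % 2 == 1 then b else a) := by
  unfold altVal
  rw [List.range_succ, List.foldl_append]
  have hcong :
      (List.range n).foldl (fun val j => val * 10 + (if (k >>> (n + 1 - 1 - j)) % 2 == 1 then b else a)) a =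
      (List.range n).foldl (fun val j => val * 10 + (if ((k / 2) >>> (n - 1 - j)) % 2 == 1 then b else a)) a := by
    apply List.foldl_ext
    intro x y hy
    have hmem := List.mem_range.mp hy
    have : k >>> (n + 1 - 1 - y) = (k / 2) >>> (n - 1 - y) := by
      have h1 : n + 1 - 1 - y = (n - 1 - y) + 1 := by omega
      rw [h1, Nat.shiftRight_succ_inside]
    rw [this]
  rw [hcong]
  simp

-- splitting an even range: map over range (2*m) = flatMap of pairs over range m
theorem map_range_two_mul (g : Nat → Int) (m : Nat) :
    (List.range (2 * m)).map g = (List.range m).flatMap (fun i => [g (2 * i), g (2 * i + 1)]) := by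
  induction m with
  | zero => simp
  | succ m ih =>
    have h2 : 2 * (m + 1) = (2 * m + 1) + 1 := by omega
    rw [h2, List.range_succ, List.range_succ, List.range_succ]
    simp [ih, List.flatMap_append]

theorem fGo_eq (a b : Int) (n : Nat) :
    fGo a b n = (List.range (2 ^ n)).map (altVal a b n) := by
  induction n with
  | zero => simp [fGo, altVal]
  | succ n ih =>
    rw [fGo, ih]
    have h2 : 2 ^ (n + 1) = 2 * 2 ^ n := by ring
    rw [h2, map_range_two_mul]
    rw [List.flatMap_map]
    apply List.flatMap_congr
    intro i _
    rw [altVal_succ, altVal_succ]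
    have e1 : 2 * i / 2 = i := by omega
    have e2 : (2 * i + 1) / 2 = i := by omega
    have e3 : 2 * i % 2 = 0 := by omega
    have e4 : (2 * i + 1) % 2 = 1 := by omega
    simp [e1, e2, e3, e4]

-- ===== VERDICT (by name: the statement is the Claim_ definition above) =====
theorem f_spec : Claim_equal_f := by
  intro a b c _ _
  unfold Spec_f f f_alt
  exact fGo_eq a b (c - 1).toNat
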